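-- pv_equiv track=rewrite | github.com/xevgeny/advent_of_code | 2023/day9/main.py | find
-- ===== SOURCE A (Python) =====
-- def find(row, fwd):
--     q = [row]
--     while not all(x == q[-1][0] for x in q[-1]):
--         xs = []
--         for i in range(len(q[-1]) - 1):
--             xs.append(q[-1][i + 1] - q[-1][i])
--         q.append(xs)
--     next = 0
--     for xs in q[::-1]:
--         next = next + xs[-1] if fwd else xs[0] - next
--     return next
-- ===== SOURCE B (Python) =====
-- def find(row, fwd):
--     # Newton binomial-weighted closed form over the reversed row: O(n) instead of
--     # building the O(n^2) difference table.
--     zs = row[::-1] if fwd else row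
--     n = len(zs)
--     total, sign, c = 0, 1, n  # c = C(n, j+1), sign = (-1)^j
--     for j in range(n):
--         total += sign * c * zs[j]
--         sign = -sign
--         c = c * (n - j - 1) // (j + 2)
--     return total
-- ===== Notes on version B (the rewrite author's own statement) =====
-- stated objective: faster
-- what changed: B replaces A's repeated construction of the whole finite-difference table (O(n^2) rows of pairwise differences, then a fold over them) by the Newton closed form: a single O(n) pass summing binomial-weighted row entries with incrementally updated binomial coefficients.
-- crash fix: On the empty row A raises IndexError (the final loop reads xs[-1]/xs[0] of the empty row); B returns 0, the empty sum. — e.g. on find([], true): A raises IndexError, B returns 0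
import Mathlib
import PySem

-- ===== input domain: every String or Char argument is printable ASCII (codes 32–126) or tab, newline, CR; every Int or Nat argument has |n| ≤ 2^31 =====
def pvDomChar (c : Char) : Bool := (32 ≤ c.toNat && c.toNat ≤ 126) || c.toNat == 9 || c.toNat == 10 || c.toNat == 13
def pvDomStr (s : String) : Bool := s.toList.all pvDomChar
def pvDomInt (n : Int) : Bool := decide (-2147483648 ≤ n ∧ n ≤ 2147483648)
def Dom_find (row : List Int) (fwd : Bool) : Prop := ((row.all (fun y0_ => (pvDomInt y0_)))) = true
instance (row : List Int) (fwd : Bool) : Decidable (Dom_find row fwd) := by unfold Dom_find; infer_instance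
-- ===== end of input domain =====

-- B replaces A's O(n^2) difference table by the O(n) Newton binomial-weighted closed form.

-- ===== PORT A =====
-- the while-loop guard: all(x == q[-1][0] for x in q[-1])
def find.isConst (cur : List Int) : Bool :=
  cur.all (fun x => x == (PySem.List.pyGet? cur 0).getD 0)

-- the inner for-loop: xs = []; for i in range(len(cur)-1): xs.append(cur[i+1]-cur[i])
def find.diffRow (cur : List Int) : List Int :=
  (PySem.List.pyRange 0 ((cur.length : Int) - 1) 1).foldl
    (fun xs i => xs ++ [(PySem.List.pyGet? cur (i + 1)).getD 0 - (PySem.List.pyGet? cur i).getD 0]) []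

-- what the inner loop builds, elementwise; cited by buildQ's decreasing_by via diffRow_length
theorem find.diffRow_eq_range_map (cur : List Int) :
    find.diffRow cur
      = (List.range (cur.length - 1)).map (fun k => cur.getD (k + 1) 0 - cur.getD k 0) := by
  unfold find.diffRow
  rw [PySem.List.foldl_append_singleton_eq_map, PySem.List.pyRange_one, List.map_map]
  have h : (((cur.length : Int) - 1) - 0).toNat = cur.length - 1 := by omega
  rw [h, List.nil_append]
  apply List.map_congr_left
  intro k _
  simp only [Function.comp, zero_add]
  have h1 : (k : Int) + 1 = ((k + 1 : Nat) : Int) := by push_cast; ring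
  rw [h1, PySem.List.pyGet?_natCast, PySem.List.pyGet?_natCast]
  simp [List.getD_eq_getElem?_getD]

theorem find.diffRow_length (cur : List Int) :
    (find.diffRow cur).length = cur.length - 1 := by
  rw [find.diffRow_eq_range_map]; simp

-- the while loop: state is the list q of rows; each pass appends the difference row
def find.buildQ (cur : List Int) : List (List Int) :=
  if find.isConst cur then [cur]
  else cur :: find.buildQ (find.diffRow cur)
termination_by cur.length
decreasing_by
  rename_i h
  have hne : cur ≠ [] := by
    intro hnil; rw [hnil] at h; simp [find.isConst] at h
  rw [find.diffRow_length]
  have : 0 < cur.length := List.length_pos_iff.mpr hne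
  omega

def find (row : List Int) (fwd : Bool) : Int :=
  let q := find.buildQ row
  ((PySem.List.slice? q none none (-1)).getD []).foldl
    (fun next xs =>
      if fwd then next + (PySem.List.pyGet? xs (-1)).getD 0
      else (PySem.List.pyGet? xs 0).getD 0 - next) 0

-- ===== PORT B =====
def find_alt (row : List Int) (fwd : Bool) : Int :=
  let zs := if fwd then (PySem.List.slice? row none none (-1)).getD [] else row
  let n : Int := zs.length
  let res := (PySem.List.pyRange 0 n 1).foldl
    (fun (s : Int × Int × Int) j =>
      (s.1 + s.2.1 * s.2.2 * (PySem.List.pyGet? zs j).getD 0,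
       -s.2.1,
       PySem.Int.floordiv (s.2.2 * (n - j - 1)) (j + 2)))
    (0, 1, n)
  res.1

-- ===== PRECONDITION & SPEC =====
-- Pre_ excludes only the empty row, on which A raises IndexError.
def Pre_find (row : List Int) (fwd : Bool) : Prop := row ≠ []

instance (row : List Int) (fwd : Bool) : Decidable (Pre_find row fwd) := by
  unfold Pre_find; infer_instance

def pvWitness_find : List Int × Bool := ([1, 3, 6, 10], true)

-- On the empty row A raises IndexError (the final loop reads xs[-1] / xs[0] of the empty row); B returns 0, the empty sum.
def Raises_find (row : List Int) (fwd : Bool) : Prop := row = []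

instance (row : List Int) (fwd : Bool) : Decidable (Raises_find row fwd) := by
  unfold Raises_find; infer_instance

def pvRaiseWitness_find : List Int × Bool := ([], true)
def pvRaiseWitnessOut_find : Int := 0

def Spec_find (row : List Int) (fwd : Bool) (out : Int) : Prop := out = find_alt row fwd
instance (row : List Int) (fwd : Bool) (out : Int) : Decidable (Spec_find row fwd out) := by unfold Spec_find; infer_instance

-- ===== CLAIM (what is proved, stated in full; the proofs are below) =====
def Claim_equal_find : Prop := ∀ (row : List Int) (fwd : Bool), Dom_find row fwd → Pre_find row fwd → Spec_find row fwd (find row fwd)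

def Claim_raises_find : Prop := (∀ (row : List Int) (fwd : Bool), Dom_find row fwd → Raises_find row fwd → ¬ Pre_find row fwd) ∧ (Dom_find (pvRaiseWitness_find.1) (pvRaiseWitness_find.2) ∧ Raises_find (pvRaiseWitness_find.1) (pvRaiseWitness_find.2) ∧ find_alt (pvRaiseWitness_find.1) (pvRaiseWitness_find.2) = pvRaiseWitnessOut_find)

-- ===== LEMMAS AND PROOFS =====

-- clean structural difference row
def ddiff : List Int → List Int
  | a :: b :: t => (b - a) :: ddiff (b :: t)
  | _ => []

-- Newton backward form: sum_j (-1)^j * C(n, j+1) * l[j]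
def newtonM (l : List Int) : Int :=
  ∑ j ∈ Finset.range l.length, (-1 : Int) ^ j * (l.length.choose (j + 1) : Int) * l.getD j 0

def sumLast (q : List (List Int)) : Int :=
  q.foldr (fun xs acc => acc + (PySem.List.pyGet? xs (-1)).getD 0) 0

def altHead (q : List (List Int)) : Int :=
  q.foldr (fun xs acc => (PySem.List.pyGet? xs 0).getD 0 - acc) 0

theorem ddiff_eq_range_map (cur : List Int) :
    ddiff cur = (List.range (cur.length - 1)).map (fun k => cur.getD (k + 1) 0 - cur.getD k 0) := by
  match cur with
  | [] => simp [ddiff]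
  | [a] => simp [ddiff]
  | a :: b :: t =>
    rw [ddiff]
    rw [ddiff_eq_range_map (b :: t)]
    simp only [List.length_cons]
    have h : (t.length + 1 + 1 - 1) = (t.length + 1 - 1) + 1 := by omega
    rw [h, List.range_succ_eq_map]
    simp [List.map_map, Function.comp]

theorem diffRow_eq_ddiff (cur : List Int) : find.diffRow cur = ddiff cur := by
  rw [find.diffRow_eq_range_map, ddiff_eq_range_map]

theorem ddiff_length (l : List Int) : (ddiff l).length = l.length - 1 := by
  rw [ddiff_eq_range_map]; simp

theorem ddiff_getD (l : List Int) (j : Nat) (h : j < l.length - 1) :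
    (ddiff l).getD j 0 = l.getD (j + 1) 0 - l.getD j 0 := by
  rw [ddiff_eq_range_map]
  rw [List.getD_eq_getElem _ _ (by simpa using h)]
  simp

theorem isConst_false_two_le (l : List Int) (h : find.isConst l = false) : 2 ≤ l.length := by
  match l with
  | [] => simp [find.isConst] at h
  | [a] => simp [find.isConst] at h
  | a :: b :: t => simp

theorem isConst_true_all (l : List Int) (h : find.isConst l = true) :
    ∀ x ∈ l, x = l.headD 0 := by
  match l with
  | [] => simp
  | a :: t =>
    intro x hx
    simp only [find.isConst, PySem.List.pyGet?_zero_cons, Option.getD_some, List.all_eq_true] at h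
    have := h x hx
    simpa using this

theorem buildQ_const (l : List Int) (h : find.isConst l = true) :
    find.buildQ l = [l] := by
  rw [find.buildQ]; simp [h]

theorem buildQ_step (l : List Int) (h : find.isConst l = false) :
    find.buildQ l = l :: find.buildQ (ddiff l) := by
  rw [find.buildQ]; simp [h, diffRow_eq_ddiff]

theorem sum_choose_succ (n : Nat) (hn : 1 ≤ n) :
    ∑ j ∈ Finset.range n, (-1 : Int) ^ j * (n.choose (j + 1) : Int) = 1 := by
  have h0 := Int.alternating_sum_range_choose (n := n)
  rw [if_neg (by omega)] at h0
  rw [Finset.sum_range_succ'] at h0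
  simp only [pow_succ, pow_zero, Nat.choose_zero_right, Nat.cast_one, mul_one] at h0
  have h1 : ∑ i ∈ Finset.range n, (-1 : Int) ^ i * (-1) * (n.choose (i + 1) : Int) = -1 := by
    linarith
  calc ∑ j ∈ Finset.range n, (-1 : Int) ^ j * (n.choose (j + 1) : Int)
      = -∑ i ∈ Finset.range n, (-1 : Int) ^ i * (-1) * (n.choose (i + 1) : Int) := by
        rw [← Finset.sum_neg_distrib]; apply Finset.sum_congr rfl; intro j _; ring
    _ = 1 := by rw [h1]; ring

theorem newtonM_const (l : List Int) (hne : l ≠ []) (h : ∀ x ∈ l, x = l.headD 0) :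
    newtonM l = l.headD 0 := by
  unfold newtonM
  have hn : 1 ≤ l.length := List.length_pos_iff.mpr hne
  have hc : ∀ j ∈ Finset.range l.length,
      (-1 : Int) ^ j * (l.length.choose (j + 1) : Int) * l.getD j 0
        = (-1 : Int) ^ j * (l.length.choose (j + 1) : Int) * l.headD 0 := by
    intro j hj
    rw [Finset.mem_range] at hj
    rw [List.getD_eq_getElem _ _ hj, h _ (List.getElem_mem hj)]
  rw [Finset.sum_congr rfl hc, ← Finset.sum_mul, sum_choose_succ _ hn, one_mul]

theorem newtonM_neg (l : List Int) : newtonM (l.map (fun x => -x)) = -newtonM l := by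
  unfold newtonM
  rw [List.length_map, ← Finset.sum_neg_distrib]
  apply Finset.sum_congr rfl
  intro j hj
  rw [Finset.mem_range] at hj
  rw [List.getD_eq_getElem _ _ (by simpa using hj), List.getD_eq_getElem _ _ hj, List.getElem_map]
  ring

-- the key Newton step identity
theorem newtonM_key (l : List Int) (hne : l ≠ []) :
    newtonM l = l.headD 0 - newtonM (ddiff l) := by
  obtain ⟨m, hm⟩ : ∃ m, l.length = m + 1 := by
    have := List.length_pos_iff.mpr hne; exact ⟨l.length - 1, by omega⟩
  have hd : newtonM (ddiff l)
      = ∑ j ∈ Finset.range m, (-1 : Int) ^ j * (m.choose (j + 1) : Int) * (l.getD (j + 1) 0 - l.getD j 0) := by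
    unfold newtonM
    rw [ddiff_length, hm]
    simp only [Nat.add_sub_cancel]
    apply Finset.sum_congr rfl
    intro j hj
    rw [Finset.mem_range] at hj
    rw [ddiff_getD l j (by omega)]
  have hhead : l.headD 0 = l.getD 0 0 := by
    cases l with | nil => simp at hne | cons a t => simp
  rw [hd, hhead]
  unfold newtonM
  rw [hm]
  set u : Nat → Int := fun j => l.getD j 0 with hu
  have hS3ext : ∑ j ∈ Finset.range (m + 1), (-1 : Int) ^ j * (m.choose (j + 1) : Int) * u j
      = ∑ j ∈ Finset.range m, (-1 : Int) ^ j * (m.choose (j + 1) : Int) * u j := by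
    rw [Finset.sum_range_succ]
    have hz : m.choose (m + 1) = 0 := Nat.choose_eq_zero_of_lt (by omega)
    simp only [hz, Nat.cast_zero, mul_zero, zero_mul, add_zero]
  have hpascal : ∑ j ∈ Finset.range (m + 1),
        ((-1 : Int) ^ j * ((m + 1).choose (j + 1) : Int) * u j
          - (-1 : Int) ^ j * (m.choose (j + 1) : Int) * u j)
      = ∑ j ∈ Finset.range (m + 1), (-1 : Int) ^ j * (m.choose j : Int) * u j := by
    apply Finset.sum_congr rfl
    intro j _
    have hp : (m + 1).choose (j + 1) = m.choose j + m.choose (j + 1) := Nat.choose_succ_succ m j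
    rw [hp]; push_cast; ring
  have hpeel : ∑ j ∈ Finset.range (m + 1), (-1 : Int) ^ j * (m.choose j : Int) * u j
      = u 0 - ∑ j ∈ Finset.range m, (-1 : Int) ^ j * (m.choose (j + 1) : Int) * u (j + 1) := by
    rw [Finset.sum_range_succ']
    have h1 : ∑ j ∈ Finset.range m, (-1 : Int) ^ (j + 1) * (m.choose (j + 1) : Int) * u (j + 1)
        = -∑ j ∈ Finset.range m, (-1 : Int) ^ j * (m.choose (j + 1) : Int) * u (j + 1) := by
      rw [← Finset.sum_neg_distrib]; apply Finset.sum_congr rfl; intro j _; ring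
    simp only [h1]; simp; ring
  have hsplit := Finset.sum_sub_distrib (s := Finset.range (m + 1))
    (f := fun j => (-1 : Int) ^ j * (((m + 1).choose (j + 1) : Nat) : Int) * u j)
    (g := fun j => (-1 : Int) ^ j * ((m.choose (j + 1) : Nat) : Int) * u j)
  have hmul : ∑ j ∈ Finset.range m, (-1 : Int) ^ j * (m.choose (j + 1) : Int) * (u (j + 1) - u j)
      = (∑ j ∈ Finset.range m, (-1 : Int) ^ j * (m.choose (j + 1) : Int) * u (j + 1))
        - ∑ j ∈ Finset.range m, (-1 : Int) ^ j * (m.choose (j + 1) : Int) * u j := by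
    rw [← Finset.sum_sub_distrib]; apply Finset.sum_congr rfl; intro j _; ring
  rw [hmul]
  rw [hsplit, hS3ext] at hpascal
  linarith [hpeel, hpascal]

theorem ddiff_reverse (l : List Int) :
    ddiff l.reverse = ((ddiff l).reverse).map (fun x => -x) := by
  apply List.ext_getElem
  · simp [ddiff_length]
  · intro i h1 h2
    have hlen : (ddiff l.reverse).length = l.length - 1 := by simp [ddiff_length]
    have hi : i < l.length - 1 := by rw [hlen] at h1; exact h1
    have hd1 : (ddiff l.reverse)[i] = (ddiff l.reverse).getD i 0 :=
      (List.getD_eq_getElem _ _ h1).symm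
    rw [hd1, ddiff_getD _ _ (by simp; omega)]
    rw [List.getElem_map, List.getElem_reverse]
    have h3 : (ddiff l).length - 1 - i < (ddiff l).length := by
      rw [ddiff_length]; omega
    have hd2 : (ddiff l)[(ddiff l).length - 1 - i] = (ddiff l).getD ((ddiff l).length - 1 - i) 0 :=
      (List.getD_eq_getElem _ _ h3).symm
    rw [hd2, ddiff_getD _ _ (by rw [ddiff_length] at h3 ⊢; omega)]
    have hr : ∀ j : Nat, j < l.length → l.reverse.getD j 0 = l.getD (l.length - 1 - j) 0 := by
      intro j hj
      rw [List.getD_eq_getElem _ _ (by simpa using hj),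
          List.getD_eq_getElem _ _ (by omega), List.getElem_reverse]
    rw [hr _ (by omega), hr _ (by omega), ddiff_length]
    have e1 : l.length - 1 - (i + 1) = l.length - 1 - 1 - i := by omega
    have e2 : l.length - 1 - 1 - i + 1 = l.length - 1 - i := by omega
    rw [e1, e2]
    ring

theorem main_bwd : ∀ (n : Nat) (l : List Int), l.length ≤ n → l ≠ [] →
    altHead (find.buildQ l) = newtonM l := by
  intro n
  induction n with
  | zero => intro l hl hne; cases l with | nil => simp at hne | cons a t => simp at hl
  | succ n ih =>
    intro l hl hne
    by_cases hc : find.isConst l = true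
    · rw [buildQ_const l hc]
      have hh : altHead [l] = l.headD 0 := by
        cases l with
        | nil => simp [altHead, PySem.List.pyGet?_zero]
        | cons a t => simp [altHead, PySem.List.pyGet?_zero]
      rw [hh, newtonM_const l hne (isConst_true_all l hc)]
    · have hc' : find.isConst l = false := by simpa using hc
      have h2 : 2 ≤ l.length := isConst_false_two_le l hc'
      have hdne : ddiff l ≠ [] := by
        have := ddiff_length l
        intro hnil; rw [hnil] at this; simp at this; omega
      rw [buildQ_step l hc']
      have hfold : altHead (l :: find.buildQ (ddiff l))
          = (PySem.List.pyGet? l 0).getD 0 - altHead (find.buildQ (ddiff l)) := rfl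
      rw [hfold, ih (ddiff l) (by rw [ddiff_length]; omega) hdne]
      have hh : (PySem.List.pyGet? l 0).getD 0 = l.headD 0 := by
        cases l with | nil => simp at hne | cons a t => simp [PySem.List.pyGet?_zero]
      rw [hh, ← newtonM_key l hne]

theorem headD_reverse (l : List Int) (hne : l ≠ []) :
    l.reverse.headD 0 = (PySem.List.pyGet? l (-1)).getD 0 := by
  rw [PySem.List.pyGet?_neg_one]
  cases hr : l.reverse with
  | nil => simp at hr; exact absurd hr hne
  | cons a t =>
    have : l.getLast? = some a := by rw [← List.head?_reverse, hr]; rfl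
    simp [this]

theorem main_fwd : ∀ (n : Nat) (l : List Int), l.length ≤ n → l ≠ [] →
    sumLast (find.buildQ l) = newtonM l.reverse := by
  intro n
  induction n with
  | zero => intro l hl hne; cases l with | nil => simp at hne | cons a t => simp at hl
  | succ n ih =>
    intro l hl hne
    have hrne : l.reverse ≠ [] := by simpa using hne
    by_cases hc : find.isConst l = true
    · rw [buildQ_const l hc]
      have hh : sumLast [l] = (PySem.List.pyGet? l (-1)).getD 0 := by
        simp [sumLast]
      have hrc : ∀ x ∈ l.reverse, x = l.reverse.headD 0 := by
        intro x hx
        rw [List.mem_reverse] at hx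
        rw [headD_reverse l hne, PySem.List.pyGet?_neg_one, List.getLast?_eq_some_getLast hne]
        simp only [Option.getD_some]
        rw [isConst_true_all l hc x hx, isConst_true_all l hc _ (List.getLast_mem hne)]
      rw [hh, newtonM_const l.reverse hrne hrc, headD_reverse l hne]
    · have hc' : find.isConst l = false := by simpa using hc
      have h2 : 2 ≤ l.length := isConst_false_two_le l hc'
      have hdne : ddiff l ≠ [] := by
        have := ddiff_length l
        intro hnil; rw [hnil] at this; simp at this; omega
      rw [buildQ_step l hc']
      have hfold : sumLast (l :: find.buildQ (ddiff l))
          = sumLast (find.buildQ (ddiff l)) + (PySem.List.pyGet? l (-1)).getD 0 := rfl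
      rw [hfold, ih (ddiff l) (by rw [ddiff_length]; omega) hdne]
      rw [newtonM_key l.reverse hrne, ddiff_reverse, newtonM_neg, headD_reverse l hne]
      ring

theorem alt_loop (zs : List Int) (k : Nat) (hk : k ≤ zs.length) :
    (PySem.List.pyRange 0 (k : Int) 1).foldl
      (fun (s : Int × Int × Int) j =>
        (s.1 + s.2.1 * s.2.2 * (PySem.List.pyGet? zs j).getD 0,
         -s.2.1,
         PySem.Int.floordiv (s.2.2 * ((zs.length : Int) - j - 1)) (j + 2)))
      (0, 1, (zs.length : Int))
    = (∑ j ∈ Finset.range k, (-1 : Int) ^ j * (zs.length.choose (j + 1) : Int) * zs.getD j 0,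
       (-1 : Int) ^ k, (zs.length.choose (k + 1) : Int)) := by
  induction k with
  | zero =>
    rw [Nat.cast_zero, PySem.List.pyRange_one_eq_nil le_rfl]
    simp [Nat.choose_one_right]
  | succ k ih =>
    have hk' : k ≤ zs.length := by omega
    have hcast : ((k + 1 : Nat) : Int) = (k : Int) + 1 := by push_cast; ring
    rw [hcast, PySem.List.pyRange_one_succ_right (by positivity), List.foldl_append, ih hk']
    simp only [List.foldl_cons, List.foldl_nil]
    refine Prod.ext ?_ (Prod.ext ?_ ?_)
    · simp only
      rw [Finset.sum_range_succ, PySem.List.pyGet?_natCast]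
      have : zs[k]?.getD 0 = zs.getD k 0 := by simp [List.getD_eq_getElem?_getD]
      rw [this]
    · simp only
      rw [pow_succ]; ring
    · simp only
      have h1 : (zs.length : Int) - (k : Int) - 1 = ((zs.length - (k + 1) : Nat) : Int) := by
        omega
      have h2 : (k : Int) + 2 = ((k + 2 : Nat) : Int) := by push_cast; ring
      rw [h1, h2, ← Nat.cast_mul, PySem.Int.floordiv_natCast]
      have h3 : zs.length.choose (k + 1) * (zs.length - (k + 1)) = zs.length.choose (k + 2) * (k + 2) :=
        (Nat.choose_succ_right_eq zs.length (k + 1)).symm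
      rw [h3, Nat.mul_div_cancel _ (by omega)]

theorem find_alt_eq_newtonM (row : List Int) (fwd : Bool) :
    find_alt row fwd = newtonM (if fwd then row.reverse else row) := by
  unfold find_alt
  cases fwd with
  | true =>
    simp only [if_true, PySem.List.slice?_none_none_neg_one, Option.getD_some]
    rw [show ((row.reverse.length : Nat) : Int) = ((row.reverse.length : Nat) : Int) from rfl]
    rw [alt_loop row.reverse row.reverse.length le_rfl]
    simp [newtonM]
  | false =>
    simp only [Bool.false_eq_true, if_false]
    rw [alt_loop row row.length le_rfl]
    simp [newtonM]

theorem find_eq_fold (row : List Int) (fwd : Bool) :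
    find row fwd = if fwd then sumLast (find.buildQ row) else altHead (find.buildQ row) := by
  unfold find
  simp only [PySem.List.slice?_none_none_neg_one, Option.getD_some]
  rw [List.foldl_reverse]
  cases fwd with
  | true => simp [sumLast]
  | false => simp [altHead]

-- ===== VERDICT (by name: the statement is the Claim_ definition above) =====
theorem find_spec : Claim_equal_find := by
  intro row fwd _ hpre
  unfold Spec_find
  rw [find_eq_fold, find_alt_eq_newtonM]
  cases fwd with
  | true => simp [main_fwd row.length row le_rfl hpre]
  | false => simp [main_bwd row.length row le_rfl hpre]

@[simp] theorem find_raises : Claim_raises_find := by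
  unfold Claim_raises_find
  exact ⟨fun row fwd _ hr hp => hp hr, by decide⟩
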